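-- pv_equiv track=rewrite | github.com/Dkos1/Vk-sentiment | saiga_analyzer.py | _group_themes_with_metadata
-- ===== SOURCE A (Python) =====
-- from collections import defaultdict
-- from typing import List, Dict, Tuple, Optional, Any
--
-- def _group_themes_with_metadata(
--
--     items: List[Tuple[str, str, str, str]],
--     deduplicate: bool = True
-- ) -> Tuple[List[Tuple[str, int, List[str]]], List[List[Tuple[str, str, str]]]]:
--     """
--     Группирует темы, подсчитывает частоту и собирает примеры с метаданными.
--     items: список (theme, comment_text, post_url, post_short_text)
--     Возвращает:
--         themes: список (тема, частота, список_комментариев_примеров)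
--         metadata: список списков метаданных для каждого примера в том же порядке
--     """
--     if not items:
--         return [], []
--     # Подсчёт частоты тем
--     theme_counts = defaultdict(int)
--     for theme, _, _, _ in items:
--         theme_counts[theme] += 1
--     # Сортируем темы по убыванию частоты
--     sorted_themes = sorted(theme_counts.keys(), key=lambda x: (-theme_counts[x], x))
--
--     if not deduplicate:
--         groups = defaultdict(list)
--         meta_groups = defaultdict(list)
--         for theme, comment, url, short_post in items:
--             groups[theme].append(comment)
--             meta_groups[theme].append((comment, url, short_post))
--         themes_res = []
--         meta_res = []
--         for theme in sorted_themes: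
--             examples = list(dict.fromkeys(groups.get(theme, [])))[:3]
--             # Собрать метаданные для этих примеров (сохраняя порядок)
--             full_meta = meta_groups.get(theme, [])
--             unique_meta = []
--             seen = set()
--             for cmt, url_, sp in full_meta:
--                 if cmt not in seen:
--                     seen.add(cmt)
--                     unique_meta.append((cmt, url_, sp))
--             themes_res.append((theme, theme_counts[theme], examples))
--             meta_res.append(unique_meta[:3])
--         return themes_res, meta_res
--
--     # Дедупликация: для каждого текста комментария оставляем тему с наивысшим приоритетом
--     theme_priority = {theme: idx for idx, theme in enumerate(sorted_themes)}
--     comment_to_theme = {}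
--     comment_to_metadata = {}
--     for theme, comment, url, short_post in items:
--         if comment not in comment_to_theme:
--             comment_to_theme[comment] = theme
--             comment_to_metadata[comment] = (url, short_post)
--         else:
--             current_priority = theme_priority[comment_to_theme[comment]]
--             new_priority = theme_priority[theme]
--             if new_priority < current_priority:
--                 comment_to_theme[comment] = theme
--                 comment_to_metadata[comment] = (url, short_post)
--
--     # Теперь собираем по темам
--     theme_to_comments = defaultdict(list)
--     theme_to_metadata = defaultdict(list)
--     for comment, theme in comment_to_theme.items():
--         url, short_post = comment_to_metadata[comment]
--         theme_to_comments[theme].append(comment)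
--         theme_to_metadata[theme].append((comment, url, short_post))
--
--     themes_res = []
--     meta_res = []
--     for theme in sorted_themes:
--         examples = theme_to_comments.get(theme, [])[:3]
--         meta_examples = theme_to_metadata.get(theme, [])[:3]
--         themes_res.append((theme, theme_counts[theme], examples))
--         meta_res.append(meta_examples)
--     return themes_res, meta_res
-- ===== SOURCE B (Python) =====
-- from collections import Counter
--
--
-- def _group_themes_with_metadata(items, deduplicate=True):
--     """Dict-free re-grouping: per-theme filter passes instead of defaultdict
--     accumulation; for deduplicate=True each comment's winning item is picked
--     with min() over its occurrences keyed by theme priority."""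
--     if not items:
--         return [], []
--     counts = Counter(theme for theme, _, _, _ in items)
--     sorted_themes = sorted(counts, key=lambda t: (-counts[t], t))
--
--     if not deduplicate:
--         per = []
--         for t in sorted_themes:
--             trips = [(c, u, s) for th, c, u, s in items if th == t]
--             examples = list(dict.fromkeys(c for c, _, _ in trips))[:3]
--             meta = [next(x for x in trips if x[0] == c) for c in examples]
--             per.append(((t, counts[t], examples), meta))
--         return [p[0] for p in per], [p[1] for p in per]
--
--     comments = list(dict.fromkeys(c for _, c, _, _ in items))
--     wins = [(c, min((x for x in items if x[1] == c),
--                     key=lambda x: sorted_themes.index(x[0])))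
--             for c in comments]
--     per = []
--     for t in sorted_themes:
--         rows = [(c, w[2], w[3]) for c, w in wins if w[0] == t][:3]
--         per.append(((t, counts[t], [c for c, _, _ in rows]), rows))
--     return [p[0] for p in per], [p[1] for p in per]
-- ===== Notes on version B (the rewrite author's own statement) =====
-- stated objective: alternative
-- what changed: Replaces A's defaultdict/dict accumulation passes by a dict-free decomposition: per-theme filter passes for deduplicate=False, and for deduplicate=True a per-comment winner picked with min() over that comment's occurrences keyed by theme priority, then per-theme filters of the winners.
import Mathlib
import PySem

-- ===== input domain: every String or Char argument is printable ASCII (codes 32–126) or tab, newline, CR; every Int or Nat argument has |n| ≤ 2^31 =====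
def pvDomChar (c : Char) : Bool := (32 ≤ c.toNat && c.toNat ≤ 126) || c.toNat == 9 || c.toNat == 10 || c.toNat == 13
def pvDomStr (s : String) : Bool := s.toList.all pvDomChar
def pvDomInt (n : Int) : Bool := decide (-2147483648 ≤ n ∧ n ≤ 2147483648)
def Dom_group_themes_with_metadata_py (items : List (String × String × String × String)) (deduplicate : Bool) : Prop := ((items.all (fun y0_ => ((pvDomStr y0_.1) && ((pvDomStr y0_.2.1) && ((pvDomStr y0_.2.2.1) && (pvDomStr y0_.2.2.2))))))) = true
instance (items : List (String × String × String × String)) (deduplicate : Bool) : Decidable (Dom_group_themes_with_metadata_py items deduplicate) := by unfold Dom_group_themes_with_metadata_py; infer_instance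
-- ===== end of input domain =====

-- ===== PORT A =====
-- Header: B regroups without intermediate dicts (per-theme filter passes; per-comment min() winner); objective: alternative decomposition, same return value.
-- A-side helpers: the loop bodies of A, named so the proofs below can speak about them
def pvStepA (prio : PySem.Dict String Int)
    (s : PySem.Dict String String × PySem.Dict String (String × String))
    (x : String × String × String × String) :
    PySem.Dict String String × PySem.Dict String (String × String) :=
  if s.1.contains x.2.1 = false then
    (s.1.insert x.2.1 x.1, s.2.insert x.2.1 (x.2.2.1, x.2.2.2))
  else
    let current_priority := prio.getD (s.1.getD x.2.1 "") 0
    let new_priority := prio.getD x.1 0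
    if new_priority < current_priority then
      (s.1.insert x.2.1 x.1, s.2.insert x.2.1 (x.2.2.1, x.2.2.2))
    else s

def pvStepSeen (st : PySem.Set String × List (String × String × String))
    (m : String × String × String) : PySem.Set String × List (String × String × String) :=
  if PySem.Set.contains st.1 m.1 then st else (PySem.Set.add st.1 m.1, st.2 ++ [m])

def pvStepBucket (c2m : PySem.Dict String (String × String))
    (b : PySem.Dict String (List String) × PySem.Dict String (List (String × String × String)))
    (p : String × String) :
    PySem.Dict String (List String) × PySem.Dict String (List (String × String × String)) :=
  let m := c2m.getD p.1 ("", "")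
  (b.1.modify p.2 [] (· ++ [p.1]), b.2.modify p.2 [] (· ++ [(p.1, m.1, m.2)]))

-- literal transliteration of A; dict lookups d[k] that can never raise (their keys are built from the same items) are getD
def group_themes_with_metadata_py (items : List (String × String × String × String)) (deduplicate : Bool) : (List (String × Int × List String)) × (List (List (String × String × String))) :=
  if items = [] then ([], [])
  else
    let theme_counts : PySem.Dict String Int := items.foldl (fun d x => d.modify x.1 0 (· + 1)) PySem.Dict.empty
    let sorted_themes : List String := PySem.List.sorted2 theme_counts.keys (fun t => -(theme_counts.getD t 0)) (fun t => t)
    if deduplicate = false then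
      let groups : PySem.Dict String (List String) := items.foldl (fun d x => d.modify x.1 [] (· ++ [x.2.1])) PySem.Dict.empty
      let meta_groups : PySem.Dict String (List (String × String × String)) := items.foldl (fun d x => d.modify x.1 [] (· ++ [(x.2.1, x.2.2.1, x.2.2.2)])) PySem.Dict.empty
      let res := sorted_themes.foldl (fun (acc : (List (String × Int × List String)) × (List (List (String × String × String)))) t =>
        let examples := (PySem.List.dedup (groups.getD t [])).take 3
        let full_meta := meta_groups.getD t []
        let unique_meta := (full_meta.foldl pvStepSeen (PySem.Set.empty, [])).2
        (acc.1 ++ [(t, theme_counts.getD t 0, examples)], acc.2 ++ [unique_meta.take 3])) ([], [])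
      res
    else
      let theme_priority : PySem.Dict String Int := (PySem.List.enumerate sorted_themes 0).foldl (fun d p => d.insert p.2 p.1) PySem.Dict.empty
      let s := items.foldl (pvStepA theme_priority) (PySem.Dict.empty, PySem.Dict.empty)
      let tb := s.1.items.foldl (pvStepBucket s.2) (PySem.Dict.empty, PySem.Dict.empty)
      let res := sorted_themes.foldl (fun (acc : (List (String × Int × List String)) × (List (List (String × String × String)))) t =>
        (acc.1 ++ [(t, theme_counts.getD t 0, (tb.1.getD t []).take 3)], acc.2 ++ [(tb.2.getD t []).take 3])) ([], [])
      res

-- ===== PORT B =====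
-- B-side helper: min((x for x in items if x[1] == c), key=lambda x: sorted_themes.index(x[0])); the generator is
-- nonempty whenever c is a comment of items, so min()/index() never raise and the port's .getD defaults are never returned
def pvWinner (sorted_themes : List String) (items : List (String × String × String × String)) (c : String) : String × String × String × String :=
  (PySem.List.min? (items.filter (fun x => x.2.1 == c))
    (fun x => (((PySem.List.index? sorted_themes x.1).getD 0 : Nat) : Int))).getD ("", "", "", "")

-- literal transliteration of B (Source B): dict-free regrouping by per-theme filter passes
def group_themes_with_metadata_py_alt (items : List (String × String × String × String)) (deduplicate : Bool) : (List (String × Int × List String)) × (List (List (String × String × String))) :=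
  if items = [] then ([], [])
  else
    let counts : PySem.Dict String Int := PySem.Dict.counter (items.map (·.1))
    let sorted_themes : List String := PySem.List.sorted2 counts.keys (fun t => -(counts.getD t 0)) (fun t => t)
    if deduplicate = false then
      let per := sorted_themes.map (fun t =>
        let trips := (items.filter (fun x => x.1 == t)).map (fun x => (x.2.1, x.2.2.1, x.2.2.2))
        let examples := (PySem.List.dedup (trips.map (·.1))).take 3
        let metaRows := examples.map (fun c => (trips.find? (fun x => x.1 == c)).getD ("", "", ""))
        ((t, counts.getD t 0, examples), metaRows))
      (per.map (·.1), per.map (·.2))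
    else
      let comments := PySem.List.dedup (items.map (·.2.1))
      let wins := comments.map (fun c => (c, pvWinner sorted_themes items c))
      let per := sorted_themes.map (fun t =>
        let rows := ((wins.filter (fun p => p.2.1 == t)).map (fun p => (p.1, p.2.2.2.1, p.2.2.2.2))).take 3
        ((t, counts.getD t 0, rows.map (·.1)), rows))
      (per.map (·.1), per.map (·.2))

-- ===== PRECONDITION & SPEC =====
def Spec_group_themes_with_metadata_py (items : List (String × String × String × String)) (deduplicate : Bool) (out : (List (String × Int × List String)) × (List (List (String × String × String)))) : Prop := out = group_themes_with_metadata_py_alt items deduplicate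
instance (items : List (String × String × String × String)) (deduplicate : Bool) (out : (List (String × Int × List String)) × (List (List (String × String × String)))) : Decidable (Spec_group_themes_with_metadata_py items deduplicate out) := by unfold Spec_group_themes_with_metadata_py; infer_instance

-- ===== CLAIM (what is proved, stated in full; the proofs are below) =====
def Claim_equal_group_themes_with_metadata_py : Prop := ∀ (items : List (String × String × String × String)) (deduplicate : Bool), Dom_group_themes_with_metadata_py items deduplicate → Spec_group_themes_with_metadata_py items deduplicate (group_themes_with_metadata_py items deduplicate)

-- ===== LEMMAS AND PROOFS =====

-- proof-local helpers and lemmas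

-- min over l ++ [x] is one more comparison step
lemma pv_min?_append {α κ : Type} [LT κ] [DecidableLT κ] (l : List α) (x : α) (key : α → κ) :
    PySem.List.min? (l ++ [x]) key =
      match PySem.List.min? l key with
      | none => some x
      | some m => if key x < key m then some x else some m := by
  simp only [PySem.List.min?, List.foldl_append, List.foldl_cons, List.foldl_nil]
  rfl

-- A's hand-rolled counting loop is Counter(themes)
lemma pv_counts_eq (items : List (String × String × String × String)) :
    items.foldl (fun d x => d.modify x.1 0 (· + 1)) PySem.Dict.empty
      = PySem.Dict.counter (items.map (·.1)) := by
  rw [PySem.Dict.counter_eq_foldl, List.foldl_map]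

-- a keyed append-into-defaultdict loop, read back at one key
lemma pv_modify_fold_getD {α β : Type} (l : List α) (k : α → String) (f : α → β) (t : String) :
    ∀ d : PySem.Dict String (List β),
      (l.foldl (fun d x => d.modify (k x) [] (· ++ [f x])) d).getD t []
        = d.getD t [] ++ (l.filter (fun x => k x == t)).map f := by
  induction l with
  | nil => simp
  | cons x l ih =>
    intro d
    rw [List.foldl_cons, ih, List.filter_cons]
    by_cases h : k x = t
    · simp [h, List.append_assoc]
    · rw [PySem.Dict.getD_modify, if_neg (fun hh => h hh.symm)]
      simp [h]

-- the seen-set loop of A's non-dedup branch, as a structural recursion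
def pvUniq (s : PySem.Set String) : List (String × String × String) → List (String × String × String)
  | [] => []
  | m :: l => if PySem.Set.contains s m.1 then pvUniq s l else m :: pvUniq (PySem.Set.add s m.1) l

lemma pv_uniq_cons (s : PySem.Set String) (m : String × String × String) (l : List (String × String × String)) :
    pvUniq s (m :: l) = if PySem.Set.contains s m.1 then pvUniq s l else m :: pvUniq (PySem.Set.add s m.1) l := rfl

lemma pv_seen_foldl (l : List (String × String × String)) :
    ∀ (s : PySem.Set String) (acc : List (String × String × String)),
      (l.foldl pvStepSeen (s, acc)).2 = acc ++ pvUniq s l := by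
  induction l with
  | nil => simp [pvUniq]
  | cons m l ih =>
    intro s acc
    rw [List.foldl_cons, pv_uniq_cons]
    by_cases h : m.1 ∈ s
    · have hc : PySem.Set.contains s m.1 = true := by simpa [PySem.Set.contains] using h
      rw [show pvStepSeen (s, acc) m = (s, acc) from by unfold pvStepSeen; rw [if_pos hc], ih, if_pos hc]
    · have hc : PySem.Set.contains s m.1 = false := by simpa [PySem.Set.contains] using h
      rw [show pvStepSeen (s, acc) m = (PySem.Set.add s m.1, acc ++ [m]) from by
          unfold pvStepSeen; rw [hc]; rfl, ih, if_neg (by rw [hc]; simp)]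
      simp

-- the seen-set loop keeps, per distinct comment not yet seen, the first triple carrying it
lemma pv_uniq_char (l : List (String × String × String)) :
    ∀ s : PySem.Set String,
      pvUniq s l = ((PySem.List.dedup (l.map (·.1))).filter (fun c => !PySem.Set.contains s c)).map
        (fun c => (l.find? (fun x => x.1 == c)).getD ("", "", "")) := by
  induction l with
  | nil => intro s; simp [pvUniq, PySem.List.dedup, PySem.Set.ofList]
  | cons m l ih =>
    intro s
    rw [List.map_cons, PySem.List.dedup_eq_ofList, PySem.Set.ofList_cons, List.filter_cons, pv_uniq_cons]
    by_cases h : m.1 ∈ s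
    · have hc : PySem.Set.contains s m.1 = true := by simpa [PySem.Set.contains] using h
      rw [if_pos hc, if_neg (by rw [hc]; simp), ih s]
      unfold PySem.Set.discard
      rw [List.filter_filter, ← PySem.List.dedup_eq_ofList]
      have h1 : ∀ c ∈ PySem.List.dedup (l.map (·.1)),
          (!PySem.Set.contains s c && !(c == m.1)) = (!PySem.Set.contains s c) := by
        intro c _
        by_cases hcs : c ∈ s
        · simp [PySem.Set.contains, hcs]
        · have hne : ¬ c = m.1 := fun he => hcs (he ▸ h)
          simp [PySem.Set.contains, hcs, hne]
      have h2 : ∀ c ∈ (PySem.List.dedup (l.map (·.1))).filter (fun c => !PySem.Set.contains s c),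
          ((m :: l).find? (fun x => x.1 == c)).getD ("", "", "")
            = (l.find? (fun x => x.1 == c)).getD ("", "", "") := by
        intro c hcmem
        have hpc := (List.mem_filter.mp hcmem).2
        have hne : ¬ (m.1 == c) = true := by
          intro hbe
          rw [show c = m.1 from (eq_of_beq hbe).symm] at hpc
          rw [hc] at hpc; simp at hpc
        rw [List.find?_cons_of_neg (p := fun x => x.1 == c) (l := l) (a := m) hne]
      rw [List.filter_congr h1, ← List.map_congr_left h2]
    · have hc : PySem.Set.contains s m.1 = false := by simpa [PySem.Set.contains] using h
      rw [if_neg (by rw [hc]; simp), if_pos (by rw [hc]; simp), ih (PySem.Set.add s m.1)]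
      rw [List.map_cons, List.find?_cons_of_pos (by simp)]
      refine congrArg₂ _ (by simp) ?_
      unfold PySem.Set.discard
      rw [List.filter_filter, ← PySem.List.dedup_eq_ofList]
      have h1 : ∀ c ∈ PySem.List.dedup (l.map (·.1)),
          (!PySem.Set.contains (PySem.Set.add s m.1) c) = (!PySem.Set.contains s c && !(c == m.1)) := by
        intro c _
        by_cases hce : c = m.1
        · subst hce
          simp [PySem.Set.add, PySem.Set.contains, h]
        · have hcb : (c == m.1) = false := by simpa using hce
          simp [PySem.Set.add, PySem.Set.contains, h, hcb, hce]
      have h2 : ∀ c ∈ (PySem.List.dedup (l.map (·.1))).filter (fun c => !PySem.Set.contains s c && !(c == m.1)),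
          ((m :: l).find? (fun x => x.1 == c)).getD ("", "", "")
            = (l.find? (fun x => x.1 == c)).getD ("", "", "") := by
        intro c hcmem
        have hpc := (List.mem_filter.mp hcmem).2
        have hne : ¬ (m.1 == c) = true := by
          intro hbe
          have : (c == m.1) = true := by simpa [BEq.comm] using hbe
          rw [this] at hpc; simp at hpc
        rw [List.find?_cons_of_neg (p := fun x => x.1 == c) (l := l) (a := m) hne]
      rw [List.filter_congr h1, ← List.map_congr_left h2]

-- each (index, element) pair is in enumerate
lemma pv_mem_enumerate {α : Type} (xs : List α) :
    ∀ (s : Int) (i : Nat) (h : i < xs.length), ((s + (i : Int), xs[i]) ∈ PySem.List.enumerate xs s) := by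
  induction xs with
  | nil => intro s i h; simp at h
  | cons x xs ih =>
    intro s i h
    rw [PySem.List.enumerate_cons]
    match i with
    | 0 => simp
    | Nat.succ j =>
      right
      have := ih (s + 1) j (by simpa using h)
      simpa [add_assoc, add_comm 1 (j : Int)] using this

-- the enumerate-built priority dict looks up as list.index (0 for absent keys on both sides)
lemma pv_prio_getD (st : List String) (hnd : st.Nodup) (t : String) :
    ((PySem.List.enumerate st 0).foldl (fun d p => d.insert p.2 p.1) PySem.Dict.empty).getD t 0
      = (((PySem.List.index? st t).getD 0 : Nat) : Int) := by
  have hitems : ((PySem.List.enumerate st 0).foldl (fun d p => d.insert p.2 p.1) PySem.Dict.empty).items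
      = (PySem.List.enumerate st 0).map (fun p => (p.2, p.1)) := by
    have := PySem.Dict.items_foldl_insert_fresh (PySem.List.enumerate st 0)
      (fun p => p.2) (fun p => p.1) (PySem.Dict.empty)
      (fun a _ => by simp) (by rw [show List.map (fun p => p.2) (PySem.List.enumerate st 0) = st from PySem.List.map_snd_enumerate st 0]; exact hnd)
    simpa using this
  have hkeys : ((PySem.List.enumerate st 0).foldl (fun d p => d.insert p.2 p.1) PySem.Dict.empty).keys = st := by
    show List.map _ _ = st
    rw [hitems, List.map_map]
    exact PySem.List.map_snd_enumerate st 0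
  by_cases hmem : t ∈ st
  · obtain ⟨i, hi⟩ := Option.isSome_iff_exists.mp ((PySem.List.index?_isSome_iff st t).mpr hmem)
    obtain ⟨hk, hget, -⟩ := PySem.List.getElem_of_index?_eq_some hi
    have hmemitems : (t, (i : Int)) ∈ ((PySem.List.enumerate st 0).foldl (fun d p => d.insert p.2 p.1) PySem.Dict.empty).items := by
      rw [hitems]
      refine List.mem_map.mpr ⟨((i : Int), t), ?_, rfl⟩
      have := pv_mem_enumerate st 0 i hk
      rw [hget] at this
      simpa using this
    rw [PySem.Dict.getD_of_mem_items _ hmemitems (by rw [hkeys]; exact hnd), hi]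
    rfl
  · rw [PySem.Dict.getD_of_not_contains _ _ (by
      rw [PySem.Dict.contains_eq_decide_mem_keys, hkeys]; simpa using hmem)]
    rw [(PySem.List.index?_eq_none_iff st t).mpr hmem]
    rfl

-- B's per-comment winner, for an arbitrary priority function g on themes
def pvWi (g : String → Int) (l : List (String × String × String × String)) (c : String) :
    String × String × String × String :=
  (PySem.List.min? (l.filter (fun x => x.2.1 == c)) (fun x => g x.1)).getD ("", "", "", "")

lemma pv_winner_eq_wi (st : List String) (items : List (String × String × String × String)) (c : String) :
    pvWinner st items c = pvWi (fun t => (((PySem.List.index? st t).getD 0 : Nat) : Int)) items c := rfl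

-- appending an item with a different comment does not change a comment's winner
lemma pv_wi_append_ne (g : String → Int) (l : List (String × String × String × String))
    (x : String × String × String × String) (c : String) (h : c ≠ x.2.1) :
    pvWi g (l ++ [x]) c = pvWi g l c := by
  unfold pvWi
  rw [List.filter_append]
  have : (x.2.1 == c) = false := by simpa using fun he => h (he.symm)
  simp [this]

-- one step of A's comparison loop, by case on whether the comment was seen
lemma pv_stepA_not_contains (prio : PySem.Dict String Int)
    (s : PySem.Dict String String × PySem.Dict String (String × String))
    (x : String × String × String × String) (h : s.1.contains x.2.1 = false) :
    pvStepA prio s x = (s.1.insert x.2.1 x.1, s.2.insert x.2.1 (x.2.2.1, x.2.2.2)) := by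
  unfold pvStepA; rw [if_pos h]

lemma pv_stepA_contains (prio : PySem.Dict String Int)
    (s : PySem.Dict String String × PySem.Dict String (String × String))
    (x : String × String × String × String) (h : s.1.contains x.2.1 = true) :
    pvStepA prio s x = if prio.getD x.1 0 < prio.getD (s.1.getD x.2.1 "") 0 then
        (s.1.insert x.2.1 x.1, s.2.insert x.2.1 (x.2.2.1, x.2.2.2)) else s := by
  unfold pvStepA; rw [if_neg (by rw [h]; simp)]

-- A's running comparison loop computes, per first-seen comment, B's min()-winner (theme and metadata)
lemma pv_c2_char (prio : PySem.Dict String Int) (g : String → Int) (hg : ∀ t, prio.getD t 0 = g t)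
    (l : List (String × String × String × String)) :
    (l.foldl (pvStepA prio) (PySem.Dict.empty, PySem.Dict.empty)).1.items
        = (PySem.List.dedup (l.map (·.2.1))).map (fun c => (c, (pvWi g l c).1)) ∧
    (l.foldl (pvStepA prio) (PySem.Dict.empty, PySem.Dict.empty)).2.items
        = (PySem.List.dedup (l.map (·.2.1))).map (fun c => (c, ((pvWi g l c).2.2.1, (pvWi g l c).2.2.2))) := by
  induction l using List.reverseRecOn with
  | nil => constructor <;> simp [PySem.List.dedup, PySem.Set.ofList, PySem.Dict.empty]
  | append_singleton l x ih =>
    obtain ⟨ih1, ih2⟩ := ih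
    have hkeys1 : (l.foldl (pvStepA prio) (PySem.Dict.empty, PySem.Dict.empty)).1.keys
        = PySem.List.dedup (l.map (·.2.1)) := by
      show List.map _ _ = _
      rw [ih1, List.map_map, show ((fun x => x.1) ∘ fun c => (c, (pvWi g l c).1)) = id from rfl, List.map_id]
    have hkeys2 : (l.foldl (pvStepA prio) (PySem.Dict.empty, PySem.Dict.empty)).2.keys
        = PySem.List.dedup (l.map (·.2.1)) := by
      show List.map _ _ = _
      rw [ih2, List.map_map, show ((fun x => x.1) ∘ fun c => (c, (pvWi g l c).2.2.1, (pvWi g l c).2.2.2)) = id from rfl, List.map_id]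
    have hnd : (PySem.List.dedup (l.map (·.2.1))).Nodup := by
      rw [PySem.List.dedup_eq_ofList]; exact PySem.Set.nodup_ofList _
    rw [List.foldl_append, List.foldl_cons, List.foldl_nil]
    have hmapapp : (l ++ [x]).map (·.2.1) = l.map (·.2.1) ++ [x.2.1] := by simp
    by_cases hcm : x.2.1 ∈ l.map (·.2.1)
    · -- comment already seen: A compares priorities, B's min? absorbs the new item
      have hcf : (l.foldl (pvStepA prio) (PySem.Dict.empty, PySem.Dict.empty)).1.contains x.2.1 = true := by
        rw [PySem.Dict.contains_eq_decide_mem_keys, hkeys1]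
        simp [hcm]
      have hded : PySem.List.dedup ((l ++ [x]).map (·.2.1)) = PySem.List.dedup (l.map (·.2.1)) := by
        rw [hmapapp, PySem.List.dedup_eq_ofList, PySem.Set.ofList_append_singleton,
          PySem.Set.add_of_mem (by rw [← PySem.List.dedup_eq_ofList]; simpa [PySem.List.mem_dedup] using hcm),
          PySem.List.dedup_eq_ofList]
      have hxc : x.2.1 ∈ PySem.List.dedup (l.map (·.2.1)) := by simpa [PySem.List.mem_dedup] using hcm
      -- the stored theme is the winner's theme
      have hgetD : (l.foldl (pvStepA prio) (PySem.Dict.empty, PySem.Dict.empty)).1.getD x.2.1 ""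
          = (pvWi g l x.2.1).1 := by
        refine PySem.Dict.getD_of_mem_items _ ?_ (by rw [hkeys1]; exact hnd) ""
        rw [ih1]; exact List.mem_map.mpr ⟨x.2.1, hxc, rfl⟩
      -- the old winner
      have hfilne : l.filter (fun y => y.2.1 == x.2.1) ≠ [] := by
        obtain ⟨y, hy, hyc⟩ := List.mem_map.mp hcm
        intro hnil
        have : y ∈ l.filter (fun y => y.2.1 == x.2.1) := List.mem_filter.mpr ⟨hy, by simp [hyc]⟩
        simp [hnil] at this
      obtain ⟨m, hm⟩ : ∃ m, PySem.List.min? (l.filter (fun y => y.2.1 == x.2.1)) (fun y => g y.1) = some m := by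
        cases hh : PySem.List.min? (l.filter (fun y => y.2.1 == x.2.1)) (fun y => g y.1) with
        | none => exact absurd ((PySem.List.min?_eq_none_iff _ _).mp hh) hfilne
        | some m => exact ⟨m, rfl⟩
      have hwil : pvWi g l x.2.1 = m := by unfold pvWi; rw [hm]; rfl
      have hwinew : pvWi g (l ++ [x]) x.2.1
          = if g x.1 < g m.1 then x else m := by
        unfold pvWi
        rw [List.filter_append, List.filter_cons, List.filter_nil, if_pos (by simp), pv_min?_append, hm]
        show (if g x.1 < g m.1 then some x else some m).getD ("", "", "", "") = _
        split_ifs <;> rfl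
      rw [pv_stepA_contains prio _ x hcf, hgetD, hwil, hg, hg]
      by_cases hlt : g x.1 < g m.1
      · rw [if_pos hlt]
        constructor
        · show (PySem.Dict.insert _ _ _).items = _
          rw [PySem.Dict.items_insert_of_contains _ _ hcf, ih1, hded, List.map_map]
          refine List.map_congr_left (fun c hc => ?_)
          by_cases hce : c = x.2.1
          · subst hce; simp [hwinew, hlt]
          · have : ((c, (pvWi g l c).1).1 == x.2.1) = false := by simpa using hce
            simp only [Function.comp_apply, this, Bool.false_eq_true, if_false]
            rw [pv_wi_append_ne g l x c hce]
        · show (PySem.Dict.insert _ _ _).items = _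
          have hcf2 : (l.foldl (pvStepA prio) (PySem.Dict.empty, PySem.Dict.empty)).2.contains x.2.1 = true := by
            rw [PySem.Dict.contains_eq_decide_mem_keys, hkeys2]
            simp [hcm]
          rw [PySem.Dict.items_insert_of_contains _ _ hcf2, ih2, hded, List.map_map]
          refine List.map_congr_left (fun c hc => ?_)
          by_cases hce : c = x.2.1
          · subst hce; simp [hwinew, hlt]
          · have : ((c, ((pvWi g l c).2.2.1, (pvWi g l c).2.2.2)).1 == x.2.1) = false := by simpa using hce
            simp only [Function.comp_apply, this, Bool.false_eq_true, if_false]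
            rw [pv_wi_append_ne g l x c hce]
      · rw [if_neg hlt]
        have hwinew' : pvWi g (l ++ [x]) x.2.1 = m := by rw [hwinew, if_neg hlt]
        constructor
        · rw [ih1, hded]
          refine List.map_congr_left (fun c hc => ?_)
          by_cases hce : c = x.2.1
          · subst hce; rw [hwinew', hwil]
          · rw [pv_wi_append_ne g l x c hce]
        · rw [ih2, hded]
          refine List.map_congr_left (fun c hc => ?_)
          by_cases hce : c = x.2.1
          · subst hce; rw [hwinew', hwil]
          · rw [pv_wi_append_ne g l x c hce]
    · -- fresh comment: A inserts, B's min? is the new item alone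
      have hcf : (l.foldl (pvStepA prio) (PySem.Dict.empty, PySem.Dict.empty)).1.contains x.2.1 = false := by
        rw [PySem.Dict.contains_eq_decide_mem_keys, hkeys1]
        simp [hcm]
      have hcf2 : (l.foldl (pvStepA prio) (PySem.Dict.empty, PySem.Dict.empty)).2.contains x.2.1 = false := by
        rw [PySem.Dict.contains_eq_decide_mem_keys, hkeys2]
        simp [hcm]
      have hded : PySem.List.dedup ((l ++ [x]).map (·.2.1))
          = PySem.List.dedup (l.map (·.2.1)) ++ [x.2.1] := by
        rw [hmapapp, PySem.List.dedup_eq_ofList, PySem.Set.ofList_append_singleton,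
          PySem.Set.add_of_not_mem (by rw [← PySem.List.dedup_eq_ofList]; simpa [PySem.List.mem_dedup] using hcm),
          PySem.List.dedup_eq_ofList]
      have hwinew : pvWi g (l ++ [x]) x.2.1 = x := by
        unfold pvWi
        rw [List.filter_append, List.filter_eq_nil_iff.mpr (fun y hy => by
            intro hbe
            exact hcm (List.mem_map.mpr ⟨y, hy, eq_of_beq hbe⟩)),
          List.filter_cons, if_pos (by simp), List.filter_nil]
        rfl
      rw [pv_stepA_not_contains prio _ x hcf]
      constructor
      · show (PySem.Dict.insert _ _ _).items = _
        rw [PySem.Dict.items_insert_of_not_contains _ _ hcf, ih1, hded, List.map_append]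
        refine congrArg₂ _ (List.map_congr_left (fun c hc => ?_)) (by rw [List.map_cons, List.map_nil, hwinew])
        rw [pv_wi_append_ne g l x c (fun he => hcm (he ▸ (PySem.List.mem_dedup _ _).mp hc))]
      · show (PySem.Dict.insert _ _ _).items = _
        rw [PySem.Dict.items_insert_of_not_contains _ _ hcf2, ih2, hded, List.map_append]
        refine congrArg₂ _ (List.map_congr_left (fun c hc => ?_)) (by rw [List.map_cons, List.map_nil, hwinew])
        rw [pv_wi_append_ne g l x c (fun he => hcm (he ▸ (PySem.List.mem_dedup _ _).mp hc))]

-- a loop appending one element to each of two result lists is a pair of maps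
lemma pv_foldl_pair_append {α β γ : Type} (l : List α) (f : α → β) (g : α → γ) :
    ∀ (a : List β) (b : List γ),
      l.foldl (fun acc x => (acc.1 ++ [f x], acc.2 ++ [g x])) (a, b) = (a ++ l.map f, b ++ l.map g) := by
  induction l with
  | nil => simp
  | cons x l ih =>
    intro a b
    rw [List.foldl_cons, ih]
    simp

-- the bucket loop is two independent keyed-append loops
lemma pv_bucket_eq (c2m : PySem.Dict String (String × String)) (L : List (String × String)) :
    L.foldl (pvStepBucket c2m) (PySem.Dict.empty, PySem.Dict.empty)
      = (L.foldl (fun b1 p => b1.modify p.2 [] (· ++ [p.1])) PySem.Dict.empty,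
         L.foldl (fun b2 p => b2.modify p.2 [] (· ++ [(p.1, (c2m.getD p.1 ("", "")).1, (c2m.getD p.1 ("", "")).2)])) PySem.Dict.empty) := by
  rw [show pvStepBucket c2m = (fun b (p : String × String) =>
      ((fun b1 (p : String × String) => PySem.Dict.modify b1 p.2 [] (· ++ [p.1])) b.1 p,
       (fun b2 (p : String × String) => PySem.Dict.modify b2 p.2 [] (· ++ [(p.1, (c2m.getD p.1 ("", "")).1, (c2m.getD p.1 ("", "")).2)])) b.2 p)) from rfl]
  exact PySem.List.foldl_prod_mk
    (fun b1 (p : String × String) => PySem.Dict.modify b1 p.2 [] (· ++ [p.1]))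
    (fun b2 (p : String × String) => PySem.Dict.modify b2 p.2 [] (· ++ [(p.1, (c2m.getD p.1 ("", "")).1, (c2m.getD p.1 ("", "")).2)]))
    L PySem.Dict.empty PySem.Dict.empty

-- the sort pivot list has no duplicate themes
lemma pv_st_nodup (items : List (String × String × String × String)) :
    (PySem.List.sorted2 (PySem.Dict.counter (items.map (·.1))).keys
      (fun t => -((PySem.Dict.counter (items.map (·.1))).getD t 0)) (fun t => t)).Nodup := by
  have h1 : (PySem.Dict.counter (items.map (·.1))).keys.Nodup := by
    rw [PySem.Dict.keys_counter]
    exact PySem.Set.nodup_ofList _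
  exact (PySem.List.sorted2_perm (PySem.Dict.counter (items.map (·.1))).keys
    (fun t => -((PySem.Dict.counter (items.map (·.1))).getD t 0)) (fun t => t) false).symm.nodup h1

-- ===== VERDICT (by name: the statement is the Claim_ definition above) =====
-- non-dedup branch, per theme: the grouped-comments dict at t is the filter pass
lemma pv_nd_groups (items : List (String × String × String × String)) (t : String) :
    (items.foldl (fun d x => d.modify x.1 [] (· ++ [x.2.1])) PySem.Dict.empty).getD t []
      = (items.filter (fun x => x.1 == t)).map (fun x => x.2.1) := by
  rw [pv_modify_fold_getD items (fun x => x.1) (fun x => x.2.1) t PySem.Dict.empty]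
  simp

lemma pv_nd_meta_groups (items : List (String × String × String × String)) (t : String) :
    (items.foldl (fun d x => d.modify x.1 [] (· ++ [(x.2.1, x.2.2.1, x.2.2.2)])) PySem.Dict.empty).getD t []
      = (items.filter (fun x => x.1 == t)).map (fun x => (x.2.1, x.2.2.1, x.2.2.2)) := by
  rw [pv_modify_fold_getD items (fun x => x.1) (fun x => (x.2.1, x.2.2.1, x.2.2.2)) t PySem.Dict.empty]
  simp

theorem group_themes_with_metadata_py_spec : Claim_equal_group_themes_with_metadata_py := by
  intro items deduplicate _
  unfold Spec_group_themes_with_metadata_py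
  simp only [group_themes_with_metadata_py, group_themes_with_metadata_py_alt]
  by_cases hnil : items = []
  · rw [if_pos hnil, if_pos hnil]
  · rw [if_neg hnil, if_neg hnil, pv_counts_eq]
    by_cases hdd : deduplicate = false
    · -- ============ non-dedup branch ============
      rw [if_pos hdd, if_pos hdd, pv_foldl_pair_append, List.map_map, List.map_map]
      refine Prod.ext ?_ ?_
      · simp only [List.nil_append]
        refine List.map_congr_left (fun t _ => ?_)
        simp only [Function.comp_apply]
        rw [pv_nd_groups, List.map_map]
        rfl
      · simp only [List.nil_append]
        refine List.map_congr_left (fun t _ => ?_)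
        simp only [Function.comp_apply]
        rw [pv_nd_meta_groups, pv_seen_foldl, pv_uniq_char]
        simp only [List.nil_append]
        rw [show (fun c => !PySem.Set.contains PySem.Set.empty c) = fun (_ : String) => true from by
            funext c; rfl, List.filter_true, List.map_take]
    · -- ============ dedup branch ============
      rw [if_neg hdd, if_neg hdd, pv_foldl_pair_append, List.map_map, List.map_map]
      set st := PySem.List.sorted2 (PySem.Dict.counter (items.map (·.1))).keys
        (fun t => -((PySem.Dict.counter (items.map (·.1))).getD t 0)) (fun t => t) with hst
      set P := (PySem.List.enumerate st 0).foldl (fun d p => d.insert p.2 p.1) PySem.Dict.empty with hP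
      have hstnd : st.Nodup := pv_st_nodup items
      have hg : ∀ th, P.getD th 0 = (((PySem.List.index? st th).getD 0 : Nat) : Int) :=
        fun th => pv_prio_getD st hstnd th
      obtain ⟨h1, h2⟩ := pv_c2_char P (fun th => (((PySem.List.index? st th).getD 0 : Nat) : Int)) hg items
      have hcomnd : (PySem.List.dedup (items.map (·.2.1))).Nodup := by
        rw [PySem.List.dedup_eq_ofList]; exact PySem.Set.nodup_ofList _
      have hkeys2 : (items.foldl (pvStepA P) (PySem.Dict.empty, PySem.Dict.empty)).2.keys
          = PySem.List.dedup (items.map (·.2.1)) := by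
        show List.map _ _ = _
        rw [h2, List.map_map,
          show ((fun x => x.1) ∘ fun c => (c, (pvWi (fun th => (((PySem.List.index? st th).getD 0 : Nat) : Int)) items c).2.2.1,
            (pvWi (fun th => (((PySem.List.index? st th).getD 0 : Nat) : Int)) items c).2.2.2)) = id from rfl, List.map_id]
      have hmeta : ∀ c ∈ PySem.List.dedup (items.map (·.2.1)),
          (items.foldl (pvStepA P) (PySem.Dict.empty, PySem.Dict.empty)).2.getD c ("", "")
            = ((pvWi (fun th => (((PySem.List.index? st th).getD 0 : Nat) : Int)) items c).2.2.1,
               (pvWi (fun th => (((PySem.List.index? st th).getD 0 : Nat) : Int)) items c).2.2.2) := by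
        intro c hc
        refine PySem.Dict.getD_of_mem_items _ ?_ (by rw [hkeys2]; exact hcomnd) _
        rw [h2]
        exact List.mem_map.mpr ⟨c, hc, rfl⟩
      refine Prod.ext ?_ ?_
      · simp only [List.nil_append]
        refine List.map_congr_left (fun t _ => ?_)
        simp only [Function.comp_apply, pv_winner_eq_wi]
        rw [pv_bucket_eq]
        show (t, _, ((List.foldl _ PySem.Dict.empty _).getD t []).take 3) = _
        rw [pv_modify_fold_getD ((items.foldl (pvStepA P) (PySem.Dict.empty, PySem.Dict.empty)).1.items)
          (fun p => p.2) (fun p => p.1) t PySem.Dict.empty, h1, List.filter_map, List.filter_map]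
        simp only [List.map_map, List.map_take, PySem.Dict.getD_empty, List.nil_append]
        rfl
      · simp only [List.nil_append]
        refine List.map_congr_left (fun t _ => ?_)
        simp only [Function.comp_apply, pv_winner_eq_wi]
        rw [pv_bucket_eq]
        show ((List.foldl _ PySem.Dict.empty _).getD t []).take 3 = _
        rw [pv_modify_fold_getD ((items.foldl (pvStepA P) (PySem.Dict.empty, PySem.Dict.empty)).1.items)
          (fun p => p.2) (fun p => (p.1, ((items.foldl (pvStepA P) (PySem.Dict.empty, PySem.Dict.empty)).2.getD p.1 ("", "")).1,
            ((items.foldl (pvStepA P) (PySem.Dict.empty, PySem.Dict.empty)).2.getD p.1 ("", "")).2)) t PySem.Dict.empty, h1,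
          List.filter_map, List.filter_map]
        simp only [List.map_map, PySem.Dict.getD_empty, List.nil_append]
        refine congrArg (List.take 3) (List.map_congr_left (fun c hc => ?_))
        have hcmem : c ∈ PySem.List.dedup (items.map (·.2.1)) := (List.mem_filter.mp hc).1
        simp only [Function.comp_apply]
        rw [hmeta c hcmem]
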